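-- pv_equiv track=rewrite | github.com/boris-pichugin/yumsh | Уроки/2022-2023 8к/2022-09-17/hw.2.py | fraction_to_str
-- ===== SOURCE A (Python) =====
-- DIGITS = "0123456789ABCDEFGHIJKLMNOPQRSTUVWXYZ"
--
-- def fraction_to_str(a: int, b: int, q: int) -> str:
--     """
--     Напечатать данную дробь a/b в данной системе счисления.
--     Если дробь конечная, то выводятся все знаки после запятой.
--     Если дробь периодическая, то период дроби выводится в скобках.
--
--     :param a: числитель дроби.
--     :param b: знаменатель дроби.
--     :param q: основание системы счисления.
--     :return: строка, содержащая цифры данной дроби в данной системе счисления.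
--     """
--     if q <= 1 or len(DIGITS) < q:
--         raise Exception(f"Основание системы счисления должно лежать в отрезке [2;{len(DIGITS)}].")
--
--     if b == 0:
--         raise Exception(f"Деление на ноль.")
--
--     if a == 0:
--         return "0"
--
--     if (a < 0 and b < 0) or (a > 0 and b > 0):
--         sign = ""
--     else:
--         sign = "-"
--
--     a = abs(a)
--     b = abs(b)
--
--     int_size = 0  # Число цифр в целой части числа.
--     while b < a:
--         int_size += 1
--         b *= q
--
--     # Получить все цифры целой части.
--     int_digits, a = _get_digits(a, b, q, int_size)
--
--     if a == 0:  # У числа нет дробной части.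
--         return sign + int_digits
--
--     prefix, period = _compute_period(a, b, q)
--
--     # Получить все цифры предпериода.
--     prefix_digits, a = _get_digits(a, b, q, prefix)
--
--     if period == 0:  # У числа нет периода
--         return sign + int_digits + "." + prefix_digits
--
--     # Получить все цифры периода.
--     period_digits, a = _get_digits(a, b, q, period)
--
--     return sign + int_digits + "." + prefix_digits + "(" + period_digits + ")"
--
-- def _compute_period(a: int, b: int, q: int) -> tuple[int, int]:
--     """
--     Найти предпериод и период дроби a/b.
--
--     :param a: положительное целое число.
--     :param b: положительное целое число такое, что a < b.
--     :param q: основание системы счисления.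
--     :return: длина предпериода и длина периода.
--     """
--     prefixes = {}
--     length = 0
--     while True:
--         if a == 0:
--             return length, 0
--         prefix = prefixes.get(a)
--         if prefix is not None:
--             return prefix, length - prefix
--         prefixes[a] = length
--         a = (a * q) % b
--         length += 1
--
-- def _get_digits(a: int, b: int, q: int, count: int) -> tuple[str, int]:
--     """
--     :param a: положительное целое число.
--     :param b: положительное целое число такое, что a < b.
--     :param q: основание системы счисления.
--     :param count: требуемое число цифр дроби a/b.
--     :return: тройка (digits, a, b), где digits - это строка, содержащая требуемое число цифр дроби;
--     a - новое значение числителя.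
--     """
--     if count == 0:
--         return "", a
--
--     digits = [""] * count
--     for i in range(count):
--         a *= q
--         digits[i] = DIGITS[a // b]
--         a = a % b
--
--     return "".join(digits), a
-- ===== SOURCE B (Python) =====
-- DIGITS = "0123456789ABCDEFGHIJKLMNOPQRSTUVWXYZ"
--
-- def fraction_to_str(a: int, b: int, q: int) -> str:
--     """Same output as A: one long-division pass over the fractional remainder,
--     with a dict remainder -> digit index; '(' is spliced in when a remainder recurs."""
--     if q <= 1 or len(DIGITS) < q:
--         raise Exception(f"Основание системы счисления должно лежать в отрезке [2;{len(DIGITS)}].")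
--     if b == 0:
--         raise Exception("Деление на ноль.")
--     if a == 0:
--         return "0"
--     sign = "" if (a < 0 and b < 0) or (a > 0 and b > 0) else "-"
--     a, b = abs(a), abs(b)
--     int_size = 0
--     while b < a:
--         int_size += 1
--         b *= q
--     int_digits = []
--     for _ in range(int_size):
--         a *= q
--         int_digits.append(DIGITS[a // b])
--         a %= b
--     head = sign + "".join(int_digits)
--     if a == 0:
--         return head
--     seen = {}
--     frac = []
--     while a != 0:
--         i = seen.get(a)
--         if i is not None:
--             frac.insert(i, "(")
--             frac.append(")")
--             break
--         seen[a] = len(frac)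
--         frac.append(DIGITS[a * q // b])
--         a = a * q % b
--     return head + "." + "".join(frac)
-- ===== Notes on version B (the rewrite author's own statement) =====
-- stated objective: alternative
-- what changed: The two-phase fractional machinery (_compute_period builds a remainder dict to find prefix/period lengths, then _get_digits re-runs the long division twice to regenerate the digits) is replaced by a single long-division pass that emits each fractional digit once, records each remainder's digit index in a dict, and splices '(' at the recorded index when a remainder recurs.
import Mathlib
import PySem

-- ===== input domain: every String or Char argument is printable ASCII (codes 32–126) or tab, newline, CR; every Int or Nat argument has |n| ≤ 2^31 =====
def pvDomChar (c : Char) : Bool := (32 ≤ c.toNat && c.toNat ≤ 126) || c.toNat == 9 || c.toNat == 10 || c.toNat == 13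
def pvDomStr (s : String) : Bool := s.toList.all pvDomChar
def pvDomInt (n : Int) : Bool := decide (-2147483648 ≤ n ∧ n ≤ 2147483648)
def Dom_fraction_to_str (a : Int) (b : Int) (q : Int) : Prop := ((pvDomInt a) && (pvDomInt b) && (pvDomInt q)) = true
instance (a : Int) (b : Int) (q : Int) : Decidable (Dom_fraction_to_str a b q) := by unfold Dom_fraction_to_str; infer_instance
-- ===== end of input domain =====

-- B replaces A's two-phase fractional machinery (_compute_period + two _get_digits re-runs)
-- by a single long-division pass that records each remainder's digit position and splices the
-- parentheses in when a remainder recurs (objective: alternative single-pass decomposition).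

-- ===== PORT A =====
-- the module constant DIGITS
def pvDigits : List Char := "0123456789ABCDEFGHIJKLMNOPQRSTUVWXYZ".toList

-- _get_digits' loop (a *= q; digit DIGITS[a//b]; a %= b), digits emitted front-to-back.
-- DIGITS[a//b] out of range is Python's IndexError (excluded by Pre_): '?' placeholder.
def pvGdLoop (b q : Int) : Nat → Int → List Char → List Char × Int
  | 0, a, acc => (acc, a)
  | n+1, a, acc =>
    let a1 := a * q
    pvGdLoop b q n (PySem.Int.mod a1 b)
      (acc ++ [(PySem.List.pyGet? pvDigits (PySem.Int.floordiv a1 b)).getD '?'])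

-- _get_digits (count = 0 returns ("", a); range(count) is empty for negative count, like toNat)
def pvGetDigits (a b q count : Int) : List Char × Int :=
  pvGdLoop b q count.toNat a []

-- _compute_period's while-True loop; fuel |b|+1 is enough by pigeonhole (remainders repeat)
def pvCpLoop (b q : Int) : Nat → Int → PySem.Dict Int Int → Int → Int × Int
  | 0, _, _, len => (len, 0)
  | f+1, a, d, len =>
    if a = 0 then (len, 0)
    else
      match PySem.Dict.get? d a with
      | some p => (p, len - p)
      | none => pvCpLoop b q f (PySem.Int.mod (a * q) b) (PySem.Dict.insert d a len) (len + 1)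

-- the 'while b < a: b *= q' scaling loop; fuel |a|+1 suffices (b at least doubles)
def pvScaleA (a q : Int) : Nat → Int → Int → Int × Int
  | 0, b, size => (size, b)
  | f+1, b, size => if b < a then pvScaleA a q f (b * q) (size + 1) else (size, b)

def fraction_to_str (a : Int) (b : Int) (q : Int) : String :=
  if q ≤ 1 ∨ (36 : Int) < q then String.ofList []      -- Python raises here (base out of range)
  else if b = 0 then String.ofList []                  -- Python raises here (division by zero)
  else if a = 0 then String.ofList ['0']
  else
    let sign : List Char := if (a < 0 ∧ b < 0) ∨ (0 < a ∧ 0 < b) then [] else ['-']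
    let a0 := |a|
    let s := pvScaleA a0 q (a0.toNat + 1) |b| 0
    let g := pvGetDigits a0 s.2 q s.1
    if g.2 = 0 then String.ofList (sign ++ g.1)
    else
      let pp := pvCpLoop s.2 q (s.2.toNat + 1) g.2 PySem.Dict.empty 0
      let pg := pvGetDigits g.2 s.2 q pp.1
      if pp.2 = 0 then String.ofList (sign ++ g.1 ++ '.' :: pg.1)
      else
        let eg := pvGetDigits pg.2 s.2 q pp.2
        String.ofList (sign ++ g.1 ++ '.' :: pg.1 ++ '(' :: eg.1 ++ [')'])

-- ===== PORT B =====
-- B's copy of the scaling loop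
def pvScaleB (a q : Int) : Nat → Int → Int → Int × Int
  | 0, b, size => (size, b)
  | f+1, b, size => if b < a then pvScaleB a q f (b * q) (size + 1) else (size, b)

-- B's integer-digit loop: appends each digit to the accumulator
def pvIntLoopB (b q : Int) : Nat → Int → List Char → List Char × Int
  | 0, a, acc => (acc, a)
  | n+1, a, acc =>
    let a1 := a * q
    pvIntLoopB b q n (PySem.Int.mod a1 b)
      (acc ++ [(PySem.List.pyGet? pvDigits (PySem.Int.floordiv a1 b)).getD '?'])

-- B's single fractional pass: dict remainder -> digit index; on recurrence splice '(' at the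
-- recorded index and close with ')'; fuel |b|+1 suffices by pigeonhole
def pvFracLoopB (b q : Int) : Nat → Int → PySem.Dict Int Int → List Char → List Char
  | 0, _, _, acc => acc
  | f+1, a, d, acc =>
    if a = 0 then acc
    else
      match PySem.Dict.get? d a with
      | some i => PySem.List.insert acc i '(' ++ [')']
      | none =>
        let a1 := a * q
        pvFracLoopB b q f (PySem.Int.mod a1 b) (PySem.Dict.insert d a (acc.length : Int))
          (acc ++ [(PySem.List.pyGet? pvDigits (PySem.Int.floordiv a1 b)).getD '?'])

def fraction_to_str_alt (a : Int) (b : Int) (q : Int) : String :=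
  if q ≤ 1 ∨ (36 : Int) < q then String.ofList []      -- raise, outside Pre_
  else if b = 0 then String.ofList []                  -- raise, outside Pre_
  else if a = 0 then String.ofList ['0']
  else
    let sign : List Char := if (a < 0 ∧ b < 0) ∨ (0 < a ∧ 0 < b) then [] else ['-']
    let a0 := |a|
    let s := pvScaleB a0 q (a0.toNat + 1) |b| 0
    let r := pvIntLoopB s.2 q s.1.toNat a0 []
    if r.2 = 0 then String.ofList (sign ++ r.1)
    else String.ofList (sign ++ r.1 ++ '.' :: pvFracLoopB s.2 q (s.2.toNat + 1) r.2 PySem.Dict.empty [])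

-- ===== PRECONDITION & SPEC =====
-- Pre_ excludes exactly the inputs where Python A raises: base outside [2,36] or b = 0
-- (explicit raise), and q = 36 with |a| = |b|·36^k, where the integer part's top digit is
-- DIGITS[36] — an IndexError (for q < 36 that same input RETURNS, so it stays inside Pre_).
def Pre_fraction_to_str (a : Int) (b : Int) (q : Int) : Prop :=
  2 ≤ q ∧ q ≤ 36 ∧ b ≠ 0 ∧ ¬(q = 36 ∧ ∃ k < 32, |a| = |b| * q ^ k)
instance (a : Int) (b : Int) (q : Int) : Decidable (Pre_fraction_to_str a b q) := by
  unfold Pre_fraction_to_str; infer_instance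

def pvWitness_fraction_to_str : Int × Int × Int := (22, 7, 10)

def Spec_fraction_to_str (a : Int) (b : Int) (q : Int) (out : String) : Prop := out = fraction_to_str_alt a b q
instance (a : Int) (b : Int) (q : Int) (out : String) : Decidable (Spec_fraction_to_str a b q out) := by unfold Spec_fraction_to_str; infer_instance

-- ===== CLAIM (what is proved, stated in full; the proofs are below) =====
def Claim_equal_fraction_to_str : Prop := ∀ (a : Int) (b : Int) (q : Int), Dom_fraction_to_str a b q → Pre_fraction_to_str a b q → Spec_fraction_to_str a b q (fraction_to_str a b q)

-- ===== LEMMAS AND PROOFS =====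

-- proof-side view of _get_digits' loop: the same digit stream, emitted by cons
def pvGdSpec (b q : Int) : Nat → Int → List Char × Int
  | 0, a => ([], a)
  | n+1, a =>
    let a1 := a * q
    let c := (PySem.List.pyGet? pvDigits (PySem.Int.floordiv a1 b)).getD '?'
    let r := pvGdSpec b q n (PySem.Int.mod a1 b)
    (c :: r.1, r.2)

theorem pvGdLoop_eq (b q : Int) (n : Nat) (a : Int) (acc : List Char) :
    pvGdLoop b q n a acc = (acc ++ (pvGdSpec b q n a).1, (pvGdSpec b q n a).2) := by
  induction n generalizing a acc with
  | zero => simp [pvGdLoop, pvGdSpec]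
  | succ n ih => simp [pvGdLoop, pvGdSpec, ih]


-- the digit/remainder stream splits additively
theorem pvGdSpec_add (b q : Int) (m n : Nat) (a : Int) :
    pvGdSpec b q (m + n) a =
      ((pvGdSpec b q m a).1 ++ (pvGdSpec b q n (pvGdSpec b q m a).2).1,
       (pvGdSpec b q n (pvGdSpec b q m a).2).2) := by
  induction m generalizing a with
  | zero => simp [pvGdSpec]
  | succ m ih => simp [Nat.succ_add, pvGdSpec, ih]

theorem pvGdSpec_length (b q : Int) (n : Nat) (a : Int) :
    (pvGdSpec b q n a).1.length = n := by
  induction n generalizing a with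
  | zero => simp [pvGdSpec]
  | succ n ih => simp [pvGdSpec, ih]

theorem pvIntLoopB_eq (b q : Int) (n : Nat) (a : Int) (acc : List Char) :
    pvIntLoopB b q n a acc = (acc ++ (pvGdSpec b q n a).1, (pvGdSpec b q n a).2) := by
  induction n generalizing a acc with
  | zero => simp [pvIntLoopB, pvGdSpec]
  | succ n ih => simp [pvIntLoopB, pvGdSpec, ih]

theorem pvScaleB_eq (a q : Int) (f : Nat) (b s : Int) :
    pvScaleB a q f b s = pvScaleA a q f b s := by
  induction f generalizing b s with
  | zero => rfl
  | succ f ih => simp only [pvScaleB, pvScaleA]; split <;> [exact ih _ _; rfl]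

-- what A's code assembles out of (_compute_period, _get_digits, _get_digits) — list level
def pvAssemble (b q r0 : Int) (pp : Int × Int) : List Char :=
  if pp.2 = 0 then (pvGdSpec b q pp.1.toNat r0).1
  else (pvGdSpec b q pp.1.toNat r0).1 ++
       '(' :: (pvGdSpec b q pp.2.toNat (pvGdSpec b q pp.1.toNat r0).2).1 ++ [')']

-- the dict faithfully records, for every remainder seen so far, the step at which it occurred
def pvInv (b q r0 : Int) (ℓ : Nat) (d : PySem.Dict Int Int) : Prop :=
  ∀ x : Int, PySem.Dict.get? d x =
    ((List.range ℓ).find? (fun j => (pvGdSpec b q j r0).2 == x)).map (fun j => (j : Int))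

-- core lockstep: B's one-pass loop from step ℓ produces exactly what A assembles from
-- _compute_period run from the same state
theorem pvLockstep (b q r0 : Int) (f : Nat) :
    ∀ (ℓ : Nat) (d : PySem.Dict Int Int), pvInv b q r0 ℓ d →
      pvFracLoopB b q f (pvGdSpec b q ℓ r0).2 d (pvGdSpec b q ℓ r0).1 =
      pvAssemble b q r0 (pvCpLoop b q f (pvGdSpec b q ℓ r0).2 d (ℓ : Int)) := by
  induction f with
  | zero =>
    intro ℓ d _
    simp [pvFracLoopB, pvCpLoop, pvAssemble]
  | succ f ih =>
    intro ℓ d hInv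
    by_cases h0 : (pvGdSpec b q ℓ r0).2 = 0
    · simp [pvFracLoopB, pvCpLoop, h0, pvAssemble]
    · cases hget : PySem.Dict.get? d (pvGdSpec b q ℓ r0).2 with
      | some p =>
        -- the remainder recurred: the dict points at its first occurrence j < ℓ
        have hfind := hInv (pvGdSpec b q ℓ r0).2
        rw [hget] at hfind
        cases hfind' : (List.range ℓ).find?
            (fun j => (pvGdSpec b q j r0).2 == (pvGdSpec b q ℓ r0).2) with
        | none => rw [hfind'] at hfind; simp at hfind
        | some j =>
          rw [hfind'] at hfind
          have hp : p = (j : Int) := by simpa using hfind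
          have hjl : j < ℓ := by
            have := List.mem_of_find?_eq_some hfind'
            simpa using this
          have hrem : (pvGdSpec b q j r0).2 = (pvGdSpec b q ℓ r0).2 := by
            have := List.find?_some hfind'
            simpa using this
          have hsplit := pvGdSpec_add b q j (ℓ - j) r0
          rw [Nat.add_sub_cancel' (Nat.le_of_lt hjl)] at hsplit
          have hlen : (pvGdSpec b q j r0).1.length = j := pvGdSpec_length b q j r0
          have hjle : j ≤ (pvGdSpec b q ℓ r0).1.length := by
            rw [pvGdSpec_length]; exact Nat.le_of_lt hjl
          simp only [pvFracLoopB, pvCpLoop, if_neg h0, hget]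
          rw [hp, PySem.List.insert_natCast _ j _ hjle]
          have hne : (ℓ : Int) - (j : Int) ≠ 0 := by
            have : (j : Int) < (ℓ : Int) := by exact_mod_cast hjl
            omega
          have htn : ((ℓ : Int) - (j : Int)).toNat = ℓ - j := by omega
          have hd1 : (pvGdSpec b q ℓ r0).1 =
              (pvGdSpec b q j r0).1 ++ (pvGdSpec b q (ℓ - j) (pvGdSpec b q j r0).2).1 := by
            rw [hsplit]
          simp only [pvAssemble, hne, Int.toNat_natCast, htn]
          rw [hd1, List.take_left' hlen, List.drop_left' hlen]
          simp
      | none =>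
        -- a fresh remainder: both loops take one more step in lockstep
        have hstep : pvGdSpec b q (ℓ + 1) r0 =
            ((pvGdSpec b q ℓ r0).1 ++
              [(PySem.List.pyGet? pvDigits
                (PySem.Int.floordiv ((pvGdSpec b q ℓ r0).2 * q) b)).getD '?'],
             PySem.Int.mod ((pvGdSpec b q ℓ r0).2 * q) b) := by
          rw [pvGdSpec_add b q ℓ 1 r0]
          simp [pvGdSpec]
        have hInv' : pvInv b q r0 (ℓ + 1)
            (PySem.Dict.insert d (pvGdSpec b q ℓ r0).2 (ℓ : Int)) := by
          intro x
          rw [PySem.Dict.get?_insert, List.range_succ, List.find?_append]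
          by_cases hx : x = (pvGdSpec b q ℓ r0).2
          · rw [if_pos hx, hx]
            have h1 := hInv (pvGdSpec b q ℓ r0).2
            rw [hget] at h1
            cases h2 : (List.range ℓ).find?
                (fun j => (pvGdSpec b q j r0).2 == (pvGdSpec b q ℓ r0).2) with
            | some j => rw [h2] at h1; simp at h1
            | none => simp [List.find?]
          · rw [if_neg hx]
            have hb : ((pvGdSpec b q ℓ r0).2 == x) = false := by
              rw [beq_eq_false_iff_ne]
              exact fun h => hx h.symm
            have h3 : (List.find? (fun j => (pvGdSpec b q j r0).2 == x) [ℓ]) = none := by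
              simp [List.find?, hb]
            rw [h3, Option.or_none]
            exact hInv x
        have hlen : ((pvGdSpec b q ℓ r0).1.length : Int) = (ℓ : Int) := by
          rw [pvGdSpec_length]
        simp only [pvFracLoopB, pvCpLoop, if_neg h0, hget, hlen]
        have hrec := ih (ℓ + 1) (PySem.Dict.insert d (pvGdSpec b q ℓ r0).2 (ℓ : Int)) hInv'
        rw [hstep] at hrec
        rw [hrec]
        have hcast : ((ℓ + 1 : Nat) : Int) = (ℓ : Int) + 1 := by push_cast; ring
        rw [hcast]

-- the two ports agree on every input (outside Pre_ both return the same placeholder values)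
theorem pvPortsEq (a b q : Int) : fraction_to_str a b q = fraction_to_str_alt a b q := by
  unfold fraction_to_str fraction_to_str_alt
  split_ifs with h1 h2 h3 hsgn <;>
    first
    | rfl
    | (simp only [pvScaleB_eq, pvIntLoopB_eq, pvGetDigits, pvGdLoop_eq, List.nil_append]
       set s := pvScaleA |a| q (|a|.toNat + 1) |b| 0 with hs
       set G := pvGdSpec s.2 q s.1.toNat |a| with hGdef
       by_cases hg : G.2 = 0
       · simp [hg]
       · have hinv : pvInv s.2 q G.2 0 (PySem.Dict.empty : PySem.Dict Int Int) := by
           intro x; simp [pysem]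
         have hlock := pvLockstep s.2 q G.2 (s.2.toNat + 1) 0 PySem.Dict.empty hinv
         have hbase : pvGdSpec s.2 q 0 G.2 = ([], G.2) := rfl
         rw [hbase] at hlock
         simp only [Nat.cast_zero] at hlock
         simp only [if_neg hg, hlock, pvAssemble]
         split_ifs <;> simp [List.append_assoc])

-- ===== VERDICT (by name: the statement is the Claim_ definition above) =====
theorem fraction_to_str_spec : Claim_equal_fraction_to_str := by
  intro a b q _ _
  unfold Spec_fraction_to_str
  exact pvPortsEq a b q
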